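-- pv_equiv track=rewrite | github.com/Miss6111/BUAA-summer-python-E-Shared-Exercise-Platform | Graph.py | extractChartData
-- ===== SOURCE A (Python) =====
-- def extractChartData(categorizedData):
--     timePoints = []
--     abilityLevels = []
--
--     # 根据时间顺序遍历数据，并计算每个时间点的能力水平
--     sortedTimes = sorted(categorizedData.keys())
--     previousAbilityLevel = 100  # 初始能力水平为100
--
--     for time in sortedTimes:
--         timePoints.append(time)
--
--         totalErrors = sum(categorizedData[time].values())
--         errorWeight = totalErrors * 10
--         currentAbilityLevel = previousAbilityLevel - errorWeight
--
--         abilityLevels.append(currentAbilityLevel)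
--         previousAbilityLevel = currentAbilityLevel
--
--     return timePoints, abilityLevels
-- ===== SOURCE B (Python) =====
-- def extractChartData(categorizedData):
--     timePoints = sorted(categorizedData.keys())
--     prefix = [sum(categorizedData[t].values()) for t in timePoints]
--     for i in range(1, len(prefix)):
--         prefix[i] += prefix[i - 1]
--     abilityLevels = [100 - 10 * c for c in prefix]
--     return timePoints, abilityLevels
-- ===== Notes on version B (the rewrite author's own statement) =====
-- stated objective: alternative
-- what changed: Replaces the single loop that threads a running previousAbilityLevel accumulator with separate passes: sort the keys, build the per-time error-sum list, turn it into prefix sums by an in-place index loop, then map each prefix sum c to 100 - 10*c.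
import Mathlib
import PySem

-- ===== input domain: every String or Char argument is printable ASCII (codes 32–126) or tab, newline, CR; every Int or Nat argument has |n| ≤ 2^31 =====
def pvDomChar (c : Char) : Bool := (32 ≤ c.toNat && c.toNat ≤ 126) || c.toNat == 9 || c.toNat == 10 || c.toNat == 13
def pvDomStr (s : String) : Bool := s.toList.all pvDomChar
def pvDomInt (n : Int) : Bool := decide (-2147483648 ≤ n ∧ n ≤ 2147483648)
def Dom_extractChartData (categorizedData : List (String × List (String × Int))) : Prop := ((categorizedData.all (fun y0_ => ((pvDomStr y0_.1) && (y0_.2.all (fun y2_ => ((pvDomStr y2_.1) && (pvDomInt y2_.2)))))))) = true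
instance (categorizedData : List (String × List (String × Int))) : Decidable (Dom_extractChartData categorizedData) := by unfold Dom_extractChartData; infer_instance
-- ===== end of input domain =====

-- B builds the result in separate passes (sort keys, per-time error sums, in-place prefix-sum pass,
-- map c to 100 - 10*c) instead of one loop threading a running ability accumulator (objective: alternative).


-- ===== PORT A =====
def extractChartData (categorizedData : List (String × List (String × Int))) : List String × List Int :=
  let d := PySem.Dict.ofList categorizedData
  let sortedTimes := PySem.List.sorted d.keys (fun x => x) false
  let st := sortedTimes.foldl
    (fun (st : List String × List Int × Int) time =>
      let timePoints := st.1 ++ [time]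
      let totalErrors := ((PySem.Dict.ofList (d.getD time [])).values).sum
      let errorWeight := totalErrors * 10
      let currentAbilityLevel := st.2.2 - errorWeight
      (timePoints, st.2.1 ++ [currentAbilityLevel], currentAbilityLevel))
    ([], [], 100)
  (st.1, st.2.1)

-- ===== PORT B =====
def extractChartData_alt (categorizedData : List (String × List (String × Int))) : List String × List Int :=
  let d := PySem.Dict.ofList categorizedData
  let timePoints := PySem.List.sorted d.keys (fun x => x) false
  let pref0 := timePoints.map
    (fun t => ((PySem.Dict.ofList (d.getD t [])).values).sum)
  let pref := (PySem.List.pyRange 1 pref0.length 1).foldl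
    (fun (l : List Int) i =>
      l.set i.toNat (PySem.List.pyGetD l i 0 + PySem.List.pyGetD l (i - 1) 0)) pref0
  let abilityLevels := pref.map (fun c => 100 - 10 * c)
  (timePoints, abilityLevels)

-- ===== PRECONDITION & SPEC =====
def Spec_extractChartData (categorizedData : List (String × List (String × Int))) (out : List String × List Int) : Prop := out = extractChartData_alt categorizedData
instance (categorizedData : List (String × List (String × Int))) (out : List String × List Int) : Decidable (Spec_extractChartData categorizedData out) := by unfold Spec_extractChartData; infer_instance

-- ===== CLAIM (what is proved, stated in full; the proofs are below) =====
def Claim_equal_extractChartData : Prop := ∀ (categorizedData : List (String × List (String × Int))), Dom_extractChartData categorizedData → Spec_extractChartData categorizedData (extractChartData categorizedData)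

-- ===== LEMMAS AND PROOFS =====

-- Loop invariant for A's fold: the accumulated lists are prefix-sum closed forms.
theorem pvLoopEq (e : String → Int) (ts : List String) (tp : List String) (al : List Int) (p : Int) :
    ts.foldl (fun (st : List String × List Int × Int) t =>
        (st.1 ++ [t], st.2.1 ++ [st.2.2 - e t * 10], st.2.2 - e t * 10)) (tp, al, p)
    = (tp ++ ts,
       al ++ (List.range ts.length).map (fun i => p - 10 * ((ts.take (i + 1)).map e).sum),
       p - 10 * (ts.map e).sum) := by
  induction ts generalizing tp al p with
  | nil => simp
  | cons t rest ih =>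
      simp only [List.foldl_cons, ih, List.length_cons, List.range_succ_eq_map, List.map_cons,
        List.map_map, List.take_succ_cons, List.map_cons, List.sum_cons]
      refine Prod.ext (by simp) (Prod.ext ?_ (by simp; ring))
      simp only [List.append_assoc]
      congr 1
      · simp
        constructor
        · ring
        · intro k _
          ring

-- B's in-place pass: after processing indices 1..k, the first k+1 entries are prefix sums
-- and the tail is untouched.
theorem pvPrefixLoop (xs : List Int) (k : Nat) (hk : k + 1 ≤ xs.length) :
    (PySem.List.pyRange 1 ((k : Int) + 1) 1).foldl
      (fun (l : List Int) i =>
        l.set i.toNat (PySem.List.pyGetD l i 0 + PySem.List.pyGetD l (i - 1) 0)) xs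
    = (List.range (k + 1)).map (fun i => (xs.take (i + 1)).sum) ++ xs.drop (k + 1) := by
  induction k with
  | zero =>
      rw [PySem.List.pyRange_one_eq_nil (by omega)]
      match xs, hk with
      | x :: rest, _ => simp
  | succ k ih =>
      have h1 : (1 : Int) ≤ (k : Int) + 1 := by omega
      have h2 : ((k : Int) + 1) ≤ (k : Int) + 1 + 1 := by omega
      have hc : ((k + 1 : Nat) : Int) + 1 = (k : Int) + 1 + 1 := by push_cast; ring
      rw [hc, PySem.List.pyRange_one_append 1 ((k : Int) + 1) ((k : Int) + 1 + 1) h1 h2,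
        PySem.List.pyRange_one_singleton, List.foldl_append, ih (by omega),
        List.foldl_cons, List.foldl_nil]
      have hlen : ((List.range (k + 1)).map (fun i => (xs.take (i + 1)).sum)).length = k + 1 := by
        simp
      have htoNat : ((k : Int) + 1).toNat = k + 1 := by omega
      have hget1 : PySem.List.pyGetD
          ((List.range (k + 1)).map (fun i => (xs.take (i + 1)).sum) ++ xs.drop (k + 1))
          ((k : Int) + 1) 0 = xs[k + 1]'(by omega) := by
        rw [PySem.List.pyGetD_of_nonneg _ _ (by omega), htoNat]
        rw [List.getD_eq_getElem?_getD, List.getElem?_append_right (by omega)]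
        simp [hlen, List.getElem?_drop, List.getElem?_eq_getElem (by omega : k + 1 < xs.length)]
      have hget2 : PySem.List.pyGetD
          ((List.range (k + 1)).map (fun i => (xs.take (i + 1)).sum) ++ xs.drop (k + 1))
          ((k : Int) + 1 - 1) 0 = (xs.take (k + 1)).sum := by
        rw [PySem.List.pyGetD_of_nonneg _ _ (by omega)]
        have : ((k : Int) + 1 - 1).toNat = k := by omega
        rw [this]
        rw [List.getD_eq_getElem?_getD, List.getElem?_append_left (by omega)]
        simp
      rw [hget1, hget2, htoNat]
      rw [List.set_eq_take_append_cons_drop, if_pos (by simp [hlen]; omega)]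
      rw [List.take_left' hlen]
      have hdrop : List.drop (k + 1 + 1)
          ((List.range (k + 1)).map (fun i => (xs.take (i + 1)).sum) ++ xs.drop (k + 1))
          = List.drop (k + 1 + 1) xs := by
        rw [List.drop_append]
        simp [hlen, List.drop_drop]
      rw [hdrop, List.range_succ (n := k + 1), List.map_append]
      simp only [List.map_cons, List.map_nil, List.append_assoc, List.cons_append,
        List.nil_append]
      rw [List.sum_take_succ _ (k + 1) (by omega)]
      ring_nf

-- ===== VERDICT (by name: the statement is the Claim_ definition above) =====
theorem extractChartData_spec : Claim_equal_extractChartData := by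
  intro cd _
  unfold Spec_extractChartData extractChartData extractChartData_alt
  simp only []
  rw [pvLoopEq]
  set d := PySem.Dict.ofList cd
  set e : String → Int := fun t => ((PySem.Dict.ofList (d.getD t [])).values).sum with he
  set ts := PySem.List.sorted d.keys (fun x => x) false
  refine Prod.ext rfl ?_
  simp only [List.nil_append]
  rcases hn : (ts.map e).length with _ | k
  · have hts : ts = [] := List.eq_nil_of_length_eq_zero (by simpa using hn)
    rw [hts]
    simp only [List.map_nil, List.length_nil, Nat.cast_zero, List.range_zero]
    rw [PySem.List.pyRange_one_eq_nil (by norm_num), List.foldl_nil]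
    simp
  · have hc : ((k + 1 : Nat) : Int) = (k : Int) + 1 := by push_cast; ring
    rw [hc, pvPrefixLoop _ _ (by omega)]
    rw [List.drop_of_length_le (by omega), List.append_nil, List.map_map]
    have hlen : ts.length = k + 1 := by simpa using hn
    rw [hlen]
    refine List.map_congr_left (fun i _ => ?_)
    simp only [Function.comp]
    rw [← List.map_take]
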